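-- pv_equiv track=rewrite | github.com/bob29678/codingpractice | vowels.py | consecvowels
-- ===== SOURCE A (Python) =====
-- vowels=["a","e","i","o","u"]
--
-- def consecvowels(word):
--     streak=0
--     beststreak=0
--     lastletter=""
--     for letter in word:
--         if letter in vowels and lastletter in vowels:
--             streak+=1
--             if streak > beststreak:
--                 beststreak=streak
--         else:
--             streak=0
--         lastletter=letter
--     beststreak+=1
--     return beststreak
-- ===== SOURCE B (Python) =====
-- # B: run-jump scan - find each maximal vowel run and take the longest; answer is max(1, longest run).
-- # (A instead counts consecutive vowel *pairs* with a streak/lastletter state machine and adds 1.)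
-- vowels = ["a", "e", "i", "o", "u"]
--
-- def consecvowels(word):
--     best = 0
--     s = word
--     while s:
--         if s[0] in "aeiou":
--             k = 0
--             while k < len(s) and s[k] in "aeiou":
--                 k += 1
--             best = max(best, k)
--             s = s[k:]
--         else:
--             s = s[1:]
--     return max(1, best)
-- ===== Notes on version B (the rewrite author's own statement) =====
-- stated objective: alternative
-- what changed: Replaces A's single-pass streak/lastletter pair-counting state machine (best consecutive-vowel-pair count plus one) by a run-jump scan that locates each maximal vowel run, keeps the longest run length, and returns max(1, longest run).
import Mathlib
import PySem

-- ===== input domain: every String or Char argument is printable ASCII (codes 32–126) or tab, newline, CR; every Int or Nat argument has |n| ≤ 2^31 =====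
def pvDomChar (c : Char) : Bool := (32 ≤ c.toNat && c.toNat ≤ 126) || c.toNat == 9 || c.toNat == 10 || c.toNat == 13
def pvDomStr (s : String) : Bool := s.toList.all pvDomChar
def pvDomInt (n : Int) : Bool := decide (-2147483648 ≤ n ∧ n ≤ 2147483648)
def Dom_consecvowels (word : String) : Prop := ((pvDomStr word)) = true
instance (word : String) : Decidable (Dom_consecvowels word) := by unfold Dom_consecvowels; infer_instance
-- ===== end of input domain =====

-- B replaces A's streak/lastletter pair-counting state machine by a run-jump scan over maximal
-- vowel runs returning max(1, longest run); same return value everywhere.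

-- ===== PORT A =====
def vowelsA : List String := ["a", "e", "i", "o", "u"]

-- the loop body of A: state (streak, beststreak, lastletter)
def stepA (st : Int × Int × String) (letter : Char) : Int × Int × String :=
  if vowelsA.contains (String.ofList [letter]) && vowelsA.contains st.2.2 then
    let streak := st.1 + 1
    (streak, if streak > st.2.1 then streak else st.2.1, String.ofList [letter])
  else
    (0, st.2.1, String.ofList [letter])

def consecvowels (word : String) : Int :=
  (word.toList.foldl stepA (0, 0, "")).2.1 + 1

-- ===== PORT B =====
def isVowelB (letter : Char) : Bool := "aeiou".toList.contains letter

-- the inner while loop of B: number of leading vowels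
def vcount : List Char → Nat
  | [] => 0
  | c :: rest => if isVowelB c then vcount rest + 1 else 0

-- the outer while loop of B
def altGo (s : List Char) (best : Int) : Int :=
  match s with
  | [] => best
  | c :: rest =>
    if hv : isVowelB c then
      let k := vcount (c :: rest)
      altGo ((c :: rest).drop k) (max best (k : Int))
    else
      altGo rest best
termination_by s.length
decreasing_by
  · have h1 : 1 ≤ vcount (c :: rest) := by simp [vcount, hv]
    simp only [List.length_drop, List.length_cons]
    omega
  · simp

def consecvowels_alt (word : String) : Int :=
  max 1 (altGo word.toList 0)

-- ===== PRECONDITION & SPEC =====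
def Spec_consecvowels (word : String) (out : Int) : Prop := out = consecvowels_alt word
instance (word : String) (out : Int) : Decidable (Spec_consecvowels word out) := by unfold Spec_consecvowels; infer_instance

-- ===== CLAIM (what is proved, stated in full; the proofs are below) =====
def Claim_equal_consecvowels : Prop := ∀ (word : String), Dom_consecvowels word → Spec_consecvowels word (consecvowels word)

-- ===== LEMMAS AND PROOFS =====

theorem beq_ofList_single (c d : Char) : (String.ofList [c] == String.ofList [d]) = (c == d) := by
  simp [← String.toList_inj]

theorem contains_ofList (c : Char) :
    vowelsA.contains (String.ofList [c]) = isVowelB c := by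
  simp only [vowelsA, isVowelB, List.contains_eq_any_beq, List.any]
  rw [show ("a" : String) = String.ofList ['a'] from rfl,
      show ("e" : String) = String.ofList ['e'] from rfl,
      show ("i" : String) = String.ofList ['i'] from rfl,
      show ("o" : String) = String.ofList ['o'] from rfl,
      show ("u" : String) = String.ofList ['u'] from rfl]
  simp only [beq_ofList_single]
  simp

theorem contains_empty : vowelsA.contains "" = false := by decide

-- reference recursion: mr xs t b = best vowel-run length, given current trailing run t and best-so-far b
def mr : List Char → Nat → Nat → Nat
  | [], _, b => b
  | c :: xs, t, b => if isVowelB c then mr xs (t + 1) (max b (t + 1)) else mr xs 0 b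

theorem vcount_eq (xs : List Char) : vcount xs = (xs.takeWhile isVowelB).length := by
  induction xs with
  | nil => rfl
  | cons c rest ih =>
    by_cases hv : isVowelB c <;> simp [vcount, List.takeWhile, hv, ih]

theorem drop_takeWhile_len (xs : List Char) :
    xs.drop (xs.takeWhile isVowelB).length = xs.dropWhile isVowelB := by
  induction xs with
  | nil => rfl
  | cons c rest ih =>
    by_cases hv : isVowelB c <;> simp [List.takeWhile, List.dropWhile, hv, ih]

theorem mr_skip : ∀ (xs : List Char) (t b : Nat), t ≤ b →
    mr xs t b = mr (xs.dropWhile isVowelB) 0 (max b (t + (xs.takeWhile isVowelB).length)) := by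
  intro xs
  induction xs with
  | nil => intro t b ht; simp [mr, List.dropWhile]; omega
  | cons c rest ih =>
    intro t b ht
    by_cases hv : isVowelB c
    · have h1 : t + 1 ≤ max b (t + 1) := le_max_right _ _
      simp only [mr, hv, if_pos, List.dropWhile_cons_of_pos hv, List.takeWhile_cons_of_pos hv,
        List.length_cons]
      rw [ih (t + 1) (max b (t + 1)) h1]
      congr 1
      omega
    · have hmax : max b (t + ((c :: rest).takeWhile isVowelB).length) = b := by
        rw [List.takeWhile_cons_of_neg hv]
        simp
        omega
      rw [List.dropWhile_cons_of_neg hv, hmax]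
      simp [mr, hv]

theorem altGo_eq_aux : ∀ (n : Nat) (xs : List Char), xs.length ≤ n → ∀ (b : Nat),
    altGo xs (b : Int) = ((mr xs 0 b : Nat) : Int) := by
  intro n
  induction n with
  | zero =>
    intro xs hlen b
    have : xs = [] := List.eq_nil_of_length_eq_zero (Nat.le_zero.mp hlen)
    subst this
    simp [altGo, mr]
  | succ n ih =>
    intro xs hlen b
    match xs with
    | [] => simp [altGo, mr]
    | c :: rest =>
      by_cases hv : isVowelB c
      · have hk : vcount (c :: rest) = ((c :: rest).takeWhile isVowelB).length := vcount_eq _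
        have hk1 : 1 ≤ vcount (c :: rest) := by simp [vcount, hv]
        rw [altGo]
        simp only [hv, dif_pos]
        rw [hk, drop_takeWhile_len]
        have hlen' : ((c :: rest).dropWhile isVowelB).length ≤ n := by
          have h2 := List.length_dropWhile_le (p := isVowelB) rest
          simp only [List.dropWhile_cons_of_pos hv]
          simp only [List.length_cons] at hlen
          omega
        have hmax : max (b : Int) ((vcount (c :: rest) : Nat) : Int)
            = ((max b (vcount (c :: rest)) : Nat) : Int) := by
          rw [Nat.cast_max]
        rw [hk] at hmax
        rw [hmax, ih _ hlen']
        rw [mr_skip (c :: rest) 0 b (Nat.zero_le _)]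
        congr 2
        omega
      · rw [altGo]
        simp only [hv, dif_neg, Bool.false_eq_true, not_false_iff]
        have hlen' : rest.length ≤ n := by simp only [List.length_cons] at hlen; omega
        rw [ih rest hlen' b]
        simp [mr, hv]

theorem foldA : ∀ (xs : List Char) (t b : Nat) (last : String), t ≤ b →
    vowelsA.contains last = decide (0 < t) →
    (xs.foldl stepA (((t - 1 : Nat) : Int), ((b - 1 : Nat) : Int), last)).2.1
      = ((mr xs t b - 1 : Nat) : Int) := by
  intro xs
  induction xs with
  | nil => intro t b last ht hl; simp [mr]
  | cons c rest ih =>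
    intro t b last ht hl
    rw [List.foldl_cons]
    by_cases hv : isVowelB c
    · by_cases hT : 0 < t
      · have hcond : stepA (((t - 1 : Nat) : Int), ((b - 1 : Nat) : Int), last) c
            = ((((t + 1) - 1 : Nat) : Int), ((max b (t + 1) - 1 : Nat) : Int), String.ofList [c]) := by
          simp only [stepA, contains_ofList, hv, hl, hT, decide_true, Bool.and_self, if_true,
            Prod.mk.injEq]
          and_intros <;> first | rfl | (split_ifs <;> omega) | omega | norm_num
        rw [hcond, ih (t + 1) (max b (t + 1)) (String.ofList [c]) (le_max_right _ _)
          (by rw [contains_ofList]; simp_all)]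
        simp [mr, hv]
      · have hT0 : decide (0 < t) = false := by simp; omega
        rw [hT0] at hl
        have hcond : stepA (((t - 1 : Nat) : Int), ((b - 1 : Nat) : Int), last) c
            = (((1 - 1 : Nat) : Int), ((max b 1 - 1 : Nat) : Int), String.ofList [c]) := by
          simp only [stepA, hl, Bool.and_false, Bool.false_eq_true, if_false, Prod.mk.injEq]
          and_intros <;> first | rfl | (split_ifs <;> omega) | omega | norm_num
        rw [hcond, ih 1 (max b 1) (String.ofList [c]) (le_max_right _ _)
          (by rw [contains_ofList]; simp_all)]
        have ht0 : t = 0 := by omega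
        subst ht0
        simp [mr, hv]
    · have hcond : stepA (((t - 1 : Nat) : Int), ((b - 1 : Nat) : Int), last) c
          = (((0 - 1 : Nat) : Int), ((b - 1 : Nat) : Int), String.ofList [c]) := by
        have hcv : vowelsA.contains (String.ofList [c]) = false := by
          rw [contains_ofList]
          simp_all
        simp only [stepA, hcv, Bool.and_false, Bool.false_and, Bool.false_eq_true, if_false,
          Prod.mk.injEq]
        and_intros <;> first | rfl | (split_ifs <;> omega) | omega | norm_num
      rw [hcond, ih 0 b (String.ofList [c]) (Nat.zero_le _)
        (by rw [contains_ofList]; simp_all)]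
      simp [mr, hv]

-- ===== VERDICT (by name: the statement is the Claim_ definition above) =====
theorem consecvowels_spec : Claim_equal_consecvowels := by
  intro word _
  unfold Spec_consecvowels consecvowels consecvowels_alt
  have hA := foldA word.toList 0 0 "" (le_refl 0) (by rw [contains_empty]; simp)
  have hB := altGo_eq_aux word.toList.length word.toList (le_refl _) 0
  norm_num at hA hB
  rw [hA, hB]
  omega
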